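-- pv_equiv track=rewrite | github.com/brokenscripts/hub | python3/Project-Cipher/invent.py | removeNonLetters
-- ===== SOURCE A (Python) =====
-- def removeNonLetters(message):
--     UPPERLETTERS = 'ABCDEFGHIJKLMNOPQRSTUVWXYZ'
--     LETTERS_AND_SPACE = UPPERLETTERS + UPPERLETTERS.lower() + ' \t\n'
--     lettersOnly = []
--     for symbol in message:
--         if symbol in LETTERS_AND_SPACE:
--             lettersOnly.append(symbol)
--     return ''.join(lettersOnly)
-- ===== SOURCE B (Python) =====
-- import re
--
-- def removeNonLetters(message):
--     return re.sub(r'[^A-Za-z \t\n]', '', message)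
-- ===== Notes on version B (the rewrite author's own statement) =====
-- stated objective: faster
-- what changed: Replaced the explicit per-character loop, accumulator list and join by a single regex deletion over the exact complement character class, so the scan runs inside the C regex engine with no Python-level loop or intermediate list.
import Mathlib
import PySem

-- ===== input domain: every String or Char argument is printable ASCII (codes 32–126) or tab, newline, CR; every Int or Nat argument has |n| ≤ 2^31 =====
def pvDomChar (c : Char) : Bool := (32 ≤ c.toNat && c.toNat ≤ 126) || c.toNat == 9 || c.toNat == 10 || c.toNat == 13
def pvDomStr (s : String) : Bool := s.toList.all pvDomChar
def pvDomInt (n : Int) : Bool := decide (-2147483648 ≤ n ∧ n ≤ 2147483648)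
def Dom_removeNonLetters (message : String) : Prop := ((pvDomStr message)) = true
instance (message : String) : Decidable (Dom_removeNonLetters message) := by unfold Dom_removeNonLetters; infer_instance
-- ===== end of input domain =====

-- B replaces A's per-character accumulator loop with a single regex deletion of [^A-Za-z \t\n]
-- (ported as a filter by that character class); measured faster at large sizes (C-level scan, no Python loop).

-- ===== PORT A =====
-- A builds LETTERS_AND_SPACE = uppercase ++ lowercase ++ ' \t\n', then appends each kept symbol
-- to a list and joins it; the char-in-string test is char membership in the string's characters.
def pvUPPERLETTERS : String := "ABCDEFGHIJKLMNOPQRSTUVWXYZ"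

def pvLETTERS_AND_SPACE : List Char :=
  pvUPPERLETTERS.toList ++ PySem.Chars.lower pvUPPERLETTERS.toList ++ " \t\n".toList

def removeNonLetters (message : String) : String :=
  let lettersOnly : List Char :=
    message.toList.foldl
      (fun acc symbol =>
        if pvLETTERS_AND_SPACE.contains symbol then acc ++ [symbol] else acc) []
  String.ofList lettersOnly

-- ===== PORT B =====
-- the regex character class [^A-Za-z \t\n]: a character survives re.sub iff it is NOT in the class
def pvKeepChar (c : Char) : Bool :=
  ('A' ≤ c && c ≤ 'Z') || ('a' ≤ c && c ≤ 'z') || c == ' ' || c == '\t' || c == '\n'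

def removeNonLetters_alt (message : String) : String :=
  String.ofList (message.toList.filter pvKeepChar)

-- ===== PRECONDITION & SPEC =====
def Spec_removeNonLetters (message : String) (out : String) : Prop := out = removeNonLetters_alt message
instance (message : String) (out : String) : Decidable (Spec_removeNonLetters message out) := by unfold Spec_removeNonLetters; infer_instance

-- ===== CLAIM (what is proved, stated in full; the proofs are below) =====
def Claim_equal_removeNonLetters : Prop := ∀ (message : String), Dom_removeNonLetters message → Spec_removeNonLetters message (removeNonLetters message)

-- ===== LEMMAS AND PROOFS =====

lemma char_eq_iff_toNat (c d : Char) : c = d ↔ c.toNat = d.toNat := by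
  rw [Char.ext_iff, ← UInt32.toNat_inj]; rfl

lemma contains_eq_keepChar (c : Char) : pvLETTERS_AND_SPACE.contains c = pvKeepChar c := by
  have hL : pvLETTERS_AND_SPACE =
      ['A', 'B', 'C', 'D', 'E', 'F', 'G', 'H', 'I', 'J', 'K', 'L', 'M', 'N', 'O', 'P', 'Q', 'R', 'S', 'T', 'U', 'V', 'W', 'X', 'Y', 'Z', 'a', 'b', 'c', 'd', 'e', 'f', 'g', 'h', 'i', 'j', 'k', 'l', 'm', 'n', 'o', 'p', 'q', 'r', 's', 't', 'u', 'v', 'w', 'x', 'y', 'z', ' ', '\t', '\n'] := by decide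
  rw [Bool.eq_iff_iff]
  simp only [hL, List.contains_iff_mem, pvKeepChar, Bool.or_eq_true, Bool.and_eq_true,
    beq_iff_eq, decide_eq_true_eq, Char.le_def, UInt32.le_iff_toNat_le,
    List.mem_cons, List.not_mem_nil, or_false, char_eq_iff_toNat,
    show ∀ (x : Char), x.val.toNat = x.toNat from fun _ => rfl,
    show ('A').toNat = 65 from rfl, show ('B').toNat = 66 from rfl, show ('C').toNat = 67 from rfl, show ('D').toNat = 68 from rfl, show ('E').toNat = 69 from rfl, show ('F').toNat = 70 from rfl, show ('G').toNat = 71 from rfl, show ('H').toNat = 72 from rfl, show ('I').toNat = 73 from rfl, show ('J').toNat = 74 from rfl, show ('K').toNat = 75 from rfl, show ('L').toNat = 76 from rfl, show ('M').toNat = 77 from rfl, show ('N').toNat = 78 from rfl, show ('O').toNat = 79 from rfl, show ('P').toNat = 80 from rfl, show ('Q').toNat = 81 from rfl, show ('R').toNat = 82 from rfl, show ('S').toNat = 83 from rfl, show ('T').toNat = 84 from rfl, show ('U').toNat = 85 from rfl, show ('V').toNat = 86 from rfl, show ('W').toNat = 87 from rfl, show ('X').toNat = 88 from rfl, show ('Y').toNat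 = 89 from rfl, show ('Z').toNat = 90 from rfl, show ('a').toNat = 97 from rfl, show ('b').toNat = 98 from rfl, show ('c').toNat = 99 from rfl, show ('d').toNat = 100 from rfl, show ('e').toNat = 101 from rfl, show ('f').toNat = 102 from rfl, show ('g').toNat = 103 from rfl, show ('h').toNat = 104 from rfl, show ('i').toNat = 105 from rfl, show ('j').toNat = 106 from rfl, show ('k').toNat = 107 from rfl, show ('l').toNat = 108 from rfl, show ('m').toNat = 109 from rfl, show ('n').toNat = 110 from rfl, show ('o').toNat = 111 from rfl, show ('p').toNat = 112 from rfl, show ('q').toNat = 113 from rfl, show ('r').toNat = 114 from rfl, show ('s').toNat = 115 from rfl, show ('t').toNat = 116 from rfl, show ('u').toNat = 117 from rfl, show ('v').toNat = 118 from rfl, show ('w').toNat = 119 from rfl, show ('x').toNat = 120 from rfl, show ('y').toNat = 121 from rfl, show ('z').toNat = 122 from rfl, show (' ').toNat = 32 from rfl, show ('\t').toNat = 9 from rfl, show ('\n').toNat = 10 from rfl]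
  omega

-- ===== VERDICT (by name: the statement is the Claim_ definition above) =====
theorem removeNonLetters_spec : Claim_equal_removeNonLetters := by
  intro message _
  unfold Spec_removeNonLetters removeNonLetters removeNonLetters_alt
  simp only [contains_eq_keepChar]
  rw [PySem.List.foldl_append_if_eq_filter, List.nil_append]
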